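-- pv_equiv track=rewrite | github.com/Estevelag/CourseraBioinformatics | week_2/missmatch.py | Pattern2num
-- ===== SOURCE A (Python) =====
-- def Pattern2num(A):
--     l=[None]*len(A)
--     a=0
--     for i in range(0,len(A)):
--         if A[i]=="A":
--             l[i]=0
--         elif A[i]=="C":
--             l[i]=1
--         elif A[i]=="G":
--             l[i]=2
--         elif A[i]=="T":
--             l[i]=3
--     for i in range(0,len(l)):
--         a=a+int(l[len(l)-i-1])*(4**i)
--     return(a)
-- ===== SOURCE B (Python) =====
-- def Pattern2num(A):
--     a = 0
--     m = {'A': 0, 'C': 1, 'G': 2, 'T': 3}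
--     for c in A:
--         a = a * 4 + int(m.get(c))
--     return a
-- ===== Notes on version B (the rewrite author's own statement) =====
-- stated objective: simpler
-- what changed: Replaces A's two passes (fill a digit list, then sum digits times 4**i by reverse indexing) with a single left-to-right Horner pass a = a*4 + digit(c) using a lookup table, with no intermediate list and no power computations.
import Mathlib
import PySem

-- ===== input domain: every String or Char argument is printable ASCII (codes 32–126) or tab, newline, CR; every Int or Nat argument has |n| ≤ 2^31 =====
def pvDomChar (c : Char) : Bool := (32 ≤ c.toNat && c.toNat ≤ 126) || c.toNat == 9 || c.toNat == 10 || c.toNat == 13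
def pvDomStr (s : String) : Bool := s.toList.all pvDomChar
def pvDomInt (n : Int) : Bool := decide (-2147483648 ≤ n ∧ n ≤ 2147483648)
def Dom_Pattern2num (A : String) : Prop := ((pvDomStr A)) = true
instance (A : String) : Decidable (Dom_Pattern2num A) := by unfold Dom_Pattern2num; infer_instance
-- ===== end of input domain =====

-- B replaces A's two passes (digit list, then sum of digit*4^i by reverse indexing) with one
-- left-to-right Horner pass a = a*4 + digit(c); objective: simpler.


-- ===== PORT A =====
-- first loop: fill l with the digit of each character (none where A leaves None)
def pvDigitA (c : Char) : Option Int :=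
  if c = 'A' then some 0
  else if c = 'C' then some 1
  else if c = 'G' then some 2
  else if c = 'T' then some 3
  else none
def Pattern2num (A : String) : Int :=
  let l : List (Option Int) := A.toList.map pvDigitA
  -- second loop: a = a + int(l[len(l)-i-1]) * 4**i ; int(None) raises (excluded by Pre_),
  -- so the out-of-Pre_ value is read as 0 via getD
  (PySem.List.pyRange 0 (l.length : Int) 1).foldl
    (fun a i => a + ((PySem.List.pyGet? l ((l.length : Int) - i - 1)).join.getD 0) * 4 ^ i.toNat) 0

-- ===== PORT B =====
def pvMapB : PySem.Dict Char Int := PySem.Dict.ofList [('A', 0), ('C', 1), ('G', 2), ('T', 3)]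
def Pattern2num_alt (A : String) : Int :=
  -- a = a*4 + int(m.get(c)); int(None) raises (excluded by Pre_), read as 0 via getD
  A.toList.foldl (fun a c => a * 4 + (PySem.Dict.get? pvMapB c).getD 0) 0

-- ===== PRECONDITION & SPEC =====
-- Pre_ admits exactly the strings of A/C/G/T characters: on any other character both
-- Pythons raise TypeError at int(None).
def Pre_Pattern2num (A : String) : Prop :=
  (A.toList.all (fun c => c == 'A' || c == 'C' || c == 'G' || c == 'T')) = true
instance (A : String) : Decidable (Pre_Pattern2num A) := by unfold Pre_Pattern2num; infer_instance
def pvWitness_Pattern2num : String := "GACT"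
def Spec_Pattern2num (A : String) (out : Int) : Prop := out = Pattern2num_alt A
instance (A : String) (out : Int) : Decidable (Spec_Pattern2num A out) := by unfold Spec_Pattern2num; infer_instance

-- ===== CLAIM (what is proved, stated in full; the proofs are below) =====
def Claim_equal_Pattern2num : Prop :=
  ∀ (A : String), Dom_Pattern2num A → Pre_Pattern2num A → Spec_Pattern2num A (Pattern2num A)

-- ===== LEMMAS AND PROOFS =====
-- total digit value, used only by the proofs
def pvDv (c : Char) : Int :=
  if c = 'A' then 0 else if c = 'C' then 1 else if c = 'G' then 2 else 3

theorem pvDigitA_eq (c : Char) (h : c = 'A' ∨ c = 'C' ∨ c = 'G' ∨ c = 'T') :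
    pvDigitA c = some (pvDv c) := by
  rcases h with h | h | h | h <;> subst h <;> rfl

theorem pvGetB_eq (c : Char) (h : c = 'A' ∨ c = 'C' ∨ c = 'G' ∨ c = 'T') :
    (PySem.Dict.get? pvMapB c).getD 0 = pvDv c := by
  rcases h with h | h | h | h <;> subst h <;> rfl

-- A's second loop as a sum over natural indices
def pvSumA (xs : List Int) : Int :=
  ((List.range xs.length).map (fun i => xs.getD (xs.length - 1 - i) 0 * 4 ^ i)).sum

theorem pvHorner_eq_sum (xs : List Int) :
    xs.foldl (fun a d => a * 4 + d) 0 = pvSumA xs := by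
  induction xs using List.reverseRecOn with
  | nil => simp [pvSumA]
  | append_singleton xs d ih =>
    rw [List.foldl_append, ih]
    simp only [pvSumA, List.length_append, List.length_cons, List.length_nil]
    rw [List.range_succ_eq_map]
    simp only [List.map_cons, List.map_map, List.sum_cons]
    have h0 : (xs ++ [d]).getD (xs.length + 1 - 1 - 0) 0 = d := by
      simp
    rw [h0]
    have hrest : ((List.range xs.length).map
        ((fun i => (xs ++ [d]).getD (xs.length + 1 - 1 - i) 0 * 4 ^ i) ∘ (· + 1))).sum
        = 4 * ((List.range xs.length).map
            (fun i => xs.getD (xs.length - 1 - i) 0 * 4 ^ i)).sum := by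
      rw [← List.sum_map_mul_left]
      apply congrArg
      apply List.map_congr_left
      intro i hi
      rw [List.mem_range] at hi
      have hlt : xs.length + 1 - 1 - (i + 1) < xs.length := by omega
      have hidx : (xs ++ [d]).getD (xs.length + 1 - 1 - (i + 1)) 0
          = xs.getD (xs.length - 1 - i) 0 := by
        rw [List.getD_append _ _ _ _ hlt]
        congr 1
        omega
      simp only [Function.comp_apply, hidx, pow_succ]
      ring
    rw [hrest]
    simp [List.foldl]
    ring

theorem pvPortA_eq_sum (cs : List Char)
    (h : ∀ c ∈ cs, c = 'A' ∨ c = 'C' ∨ c = 'G' ∨ c = 'T') :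
    (PySem.List.pyRange 0 ((cs.map pvDigitA).length : Int) 1).foldl
      (fun a i => a + ((PySem.List.pyGet? (cs.map pvDigitA)
          (((cs.map pvDigitA).length : Int) - i - 1)).join.getD 0) * 4 ^ i.toNat) 0
    = pvSumA (cs.map pvDv) := by
  simp only [List.length_map]
  rw [PySem.List.pyRange_zero_natCast]
  rw [List.foldl_map]
  rw [PySem.List.foldl_add]
  simp only [pvSumA, List.length_map]
  rw [zero_add]
  apply congrArg
  apply List.map_congr_left
  intro i hi
  rw [List.mem_range] at hi
  have hidx : ((cs.length : Int) - (i : Int) - 1) = ((cs.length - 1 - i : Nat) : Int) := by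
    omega
  have hlt : cs.length - 1 - i < cs.length := by omega
  rw [hidx, PySem.List.pyGet?_natCast]
  rw [List.getElem?_eq_getElem (by simpa using hlt)]
  simp only [List.getElem_map, Option.join_some]
  rw [pvDigitA_eq _ (h _ (by exact List.getElem_mem _))]
  rw [List.getD_eq_getElem _ _ (by simpa using hlt)]
  simp [Int.toNat_natCast]

theorem pvPortB_eq_horner (cs : List Char)
    (h : ∀ c ∈ cs, c = 'A' ∨ c = 'C' ∨ c = 'G' ∨ c = 'T') :
    cs.foldl (fun a c => a * 4 + (PySem.Dict.get? pvMapB c).getD 0) 0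
    = (cs.map pvDv).foldl (fun a d => a * 4 + d) 0 := by
  rw [List.foldl_map]
  apply PySem.List.foldl_congr_mem
  intro a c hc
  rw [pvGetB_eq c (h c hc)]

-- ===== VERDICT (by name: the statement is the Claim_ definition above) =====
theorem Pattern2num_spec : Claim_equal_Pattern2num := by
  intro A _ hpre
  unfold Spec_Pattern2num Pattern2num Pattern2num_alt
  have h : ∀ c ∈ A.toList, c = 'A' ∨ c = 'C' ∨ c = 'G' ∨ c = 'T' := by
    intro c hc
    have := List.all_eq_true.mp hpre c hc
    simp only [Bool.or_eq_true, beq_iff_eq] at this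
    tauto
  rw [pvPortB_eq_horner _ h, pvHorner_eq_sum]
  exact pvPortA_eq_sum A.toList h
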